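-- pv_equiv track=rewrite | github.com/Luke23-45/topo_synapse | synapse_core/anchor_selector.py | admissible_index_sets
-- ===== SOURCE A (Python) =====
-- from typing import List, Set, Tuple, Optional
--
-- def admissible_index_sets(K: int, r: int, T: int) -> List[List[int]]:
--     """
--     Enumerate all admissible index sets in 𝔍_{K,r,T}.
--
--     Formal definition (§5 of 01_main_definition.md):
--         𝔍_{K,r,T} = { I = {i_1 < ... < i_m} ⊆ {2,...,T}
--                        : m ≤ K, i_{j+1} − i_j > r }
--
--     Note: The empty set is always admissible (m=0 ≤ K).
--
--     Parameters
--     ----------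
--     K : int
--         Maximum number of retained anchors.
--     r : int
--         Minimum separation between anchors (i_{j+1} − i_j > r).
--     T : int
--         Trajectory length.
--
--     Returns
--     -------
--     sets : list of list of int
--         All admissible index sets, each in sorted order.
--     """
--     if T < 2:
--         return [[]]  # Only the empty set is admissible
--
--     candidates = list(range(1, T))  # 0-indexed: positions 1..T-1 correspond to formal indices 2..T
--
--     result = [[]]  # Empty set is always admissible
--
--     def _recurse(start: int, current: List[int]):
--         if len(current) == K:
--             return
--         for i in range(start, len(candidates)):
--             idx = candidates[i]
--             # Check spacing constraint with the last selected
--             if current and (idx - current[-1]) <= r: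
--                 continue
--             new_set = current + [idx]
--             result.append(list(new_set))
--             _recurse(i + 1, new_set)
--
--     _recurse(0, [])
--     return result
-- ===== SOURCE B (Python) =====
-- def admissible_index_sets(K: int, r: int, T: int):
--     """Alternative decomposition: binary include/exclude structural recursion on the
--     candidate suffix, building each set bottom-up by prefixing, instead of A's
--     index-loop DFS mutating a shared prefix and a global result list."""
--     if T < 2:
--         return [[]]
--     candidates = list(range(1, T))
--     n = len(candidates)
--
--     def chains(j, last, budget):
--         # All nonempty admissible chains drawn from candidates[j:], whose first
--         # element must exceed `last` by more than r (if last is not None), of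
--         # length at most `budget`; in A's preorder.
--         if budget == 0 or j == n:
--             return []
--         x = candidates[j]
--         without_x = chains(j + 1, last, budget)
--         if last is not None and x - last <= r:
--             return without_x
--         return [[x]] + [[x] + e for e in chains(j + 1, x, budget - 1)] + without_x
--
--     return [[]] + chains(0, None, K)
-- ===== Notes on version B (the rewrite author's own statement) =====
-- stated objective: alternative
-- what changed: Replaced A's index-loop DFS that mutates a shared growing prefix and appends into a global result list by a pure binary include/exclude structural recursion on the candidate suffix that builds each set bottom-up by prefixing and concatenates the with-head and without-head result lists.
import Mathlib
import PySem

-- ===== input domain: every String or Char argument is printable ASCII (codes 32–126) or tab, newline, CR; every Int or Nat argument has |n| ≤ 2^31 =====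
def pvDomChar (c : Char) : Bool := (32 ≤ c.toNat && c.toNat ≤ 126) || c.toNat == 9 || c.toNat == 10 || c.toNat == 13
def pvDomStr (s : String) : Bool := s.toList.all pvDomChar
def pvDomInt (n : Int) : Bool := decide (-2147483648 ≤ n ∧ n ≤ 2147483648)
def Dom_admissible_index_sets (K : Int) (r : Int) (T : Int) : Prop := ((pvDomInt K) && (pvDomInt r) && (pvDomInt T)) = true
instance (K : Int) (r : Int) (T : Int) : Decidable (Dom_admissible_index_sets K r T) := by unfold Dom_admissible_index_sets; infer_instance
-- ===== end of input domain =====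

-- B is an alternative decomposition (include/exclude recursion on the candidate suffix,
-- prefixing bottom-up) of A's index-driven prefix-mutating DFS; same cost, no speed claim.

-- ===== PORT A =====
-- A's nested `_recurse` mutates a global `result`; we port it as two mutually recursive
-- functions returning the list of sets appended, in order: pvRecA is `_recurse` (the
-- len==K cutoff), pvLoopA is its `for i in range(start, len(candidates))` loop.
mutual
def pvRecA (K r : Int) (cands : List Int) (start : Nat) (current : List Int) : List (List Int) :=
  if (current.length : Int) = K then []
  else pvLoopA K r cands start current
termination_by (cands.length - start, 1)

def pvLoopA (K r : Int) (cands : List Int) (i : Nat) (current : List Int) : List (List Int) :=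
  if h : i < cands.length then
    let idx := cands[i]
    -- `if current and (idx - current[-1]) <= r: continue`
    if (match current.getLast? with | some l => decide (idx - l ≤ r) | none => false) then
      pvLoopA K r cands (i + 1) current
    else
      (current ++ [idx]) :: (pvRecA K r cands (i + 1) (current ++ [idx]) ++ pvLoopA K r cands (i + 1) current)
  else []
termination_by (cands.length - i, 0)
end

def admissible_index_sets (K : Int) (r : Int) (T : Int) : List (List Int) :=
  if T < 2 then [[]]
  else
    let candidates := PySem.List.pyRange 1 T 1
    [[]] ++ pvRecA K r candidates 0 []

-- ===== PORT B =====
-- pvChains is Source B's `chains`: structural include/exclude recursion on the suffix `tail`.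
def pvChains (r : Int) (cands : List Int) (j : Nat) (last : Option Int) (budget : Int) : List (List Int) :=
  if budget = 0 then []
  else if h : j < cands.length then  -- `j == n` exit, as the totality guard
    let x := cands[j]
    let without_x := pvChains r cands (j + 1) last budget
    if (match last with | some l => decide (x - l ≤ r) | none => false) then without_x
    else ([x] :: (pvChains r cands (j + 1) (some x) (budget - 1)).map (fun e => x :: e)) ++ without_x
  else []
termination_by cands.length - j

def admissible_index_sets_alt (K : Int) (r : Int) (T : Int) : List (List Int) :=
  if T < 2 then [[]]
  else [[]] ++ pvChains r (PySem.List.pyRange 1 T 1) 0 none K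

-- ===== PRECONDITION & SPEC =====
def Spec_admissible_index_sets (K : Int) (r : Int) (T : Int) (out : List (List Int)) : Prop := out = admissible_index_sets_alt K r T
instance (K : Int) (r : Int) (T : Int) (out : List (List Int)) : Decidable (Spec_admissible_index_sets K r T out) := by unfold Spec_admissible_index_sets; infer_instance

-- ===== CLAIM (what is proved, stated in full; the proofs are below) =====
def Claim_equal_admissible_index_sets : Prop := ∀ (K : Int) (r : Int) (T : Int), Dom_admissible_index_sets K r T → Spec_admissible_index_sets K r T (admissible_index_sets K r T)

-- ===== LEMMAS AND PROOFS =====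

-- The loop of A, started at index i with accumulated prefix `current` (not yet full),
-- produces exactly B's chains over the remaining suffix, each prefixed by `current`.
lemma pvLoopA_eq (K r : Int) (cands : List Int) :
    ∀ (fuel i : Nat) (current : List Int), cands.length - i ≤ fuel → (current.length : Int) ≠ K →
      pvLoopA K r cands i current
        = (pvChains r cands i current.getLast? (K - current.length)).map (fun e => current ++ e) := by
  intro fuel
  induction fuel with
  | zero =>
    intro i current hle hne
    have h : ¬ i < cands.length := by omega
    rw [pvLoopA, pvChains.eq_def]
    simp [h]
  | succ fuel ih =>
    intro i current hle hne
    by_cases h : i < cands.length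
    · have hb : K - (current.length : Int) ≠ 0 := by omega
      have hrec : pvRecA K r cands (i + 1) (current ++ [cands[i]])
          = (pvChains r cands (i + 1) (some cands[i]) (K - (current.length : Int) - 1)).map
              (fun e => current ++ cands[i] :: e) := by
        rw [pvRecA]
        by_cases hK : ((current ++ [cands[i]]).length : Int) = K
        · have : K - (current.length : Int) - 1 = 0 := by simp at hK; omega
          rw [if_pos hK, this, pvChains.eq_def]
          simp
        · rw [if_neg hK, ih (i + 1) (current ++ [cands[i]]) (by omega) hK,
            List.getLast?_concat]
          have hlen : K - ((current ++ [cands[i]]).length : Int) = K - (current.length : Int) - 1 := by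
            simp; ring
          rw [hlen]
          apply List.map_congr_left
          intro e _
          simp
      rw [pvLoopA, dif_pos h]
      conv_rhs => rw [pvChains.eq_def]
      simp only [if_neg hb, dif_pos h]
      by_cases hskip : (match current.getLast? with
          | some l => decide (cands[i] - l ≤ r) | none => false) = true
      · rw [if_pos hskip, if_pos hskip, ih (i + 1) current (by omega) hne]
      · rw [if_neg hskip, if_neg hskip, ih (i + 1) current (by omega) hne, hrec]
        simp [List.map_map, Function.comp]
    · rw [pvLoopA, pvChains.eq_def]
      simp [h]

lemma pvRecA_eq (K r : Int) (cands : List Int) (i : Nat) (current : List Int) :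
    pvRecA K r cands i current
      = (pvChains r cands i current.getLast? (K - current.length)).map (fun e => current ++ e) := by
  rw [pvRecA]
  by_cases hK : (current.length : Int) = K
  · rw [if_pos hK]
    have : K - (current.length : Int) = 0 := by omega
    rw [this, pvChains.eq_def]
    simp
  · rw [if_neg hK]
    exact pvLoopA_eq K r cands cands.length i current (by omega) hK

-- ===== VERDICT (by name: the statement is the Claim_ definition above) =====
theorem admissible_index_sets_spec : Claim_equal_admissible_index_sets := by
  intro K r T _
  unfold Spec_admissible_index_sets admissible_index_sets admissible_index_sets_alt
  split
  · rfl
  · have h := pvRecA_eq K r (PySem.List.pyRange 1 T 1) 0 []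
    simp at h
    simp [h]
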